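-- pv_equiv track=rewrite | github.com/harshdeep220/news-analyzer | pipeline/data_validator.py | _is_empty_scrape
-- ===== SOURCE A (Python) =====
-- EMPTY_SCRAPE_PATTERNS = [
--     "javascript is required",
--     "enable javascript",
--     "please enable cookies",
--     "access denied",
--     "403 forbidden",
--     "page not found",
--     "404 error",
--     "captcha",
-- ]
--
-- def _is_empty_scrape(content: str) -> bool:
--     """Check if content is an empty or failed scrape."""
--     content_lower = content.lower().strip()
--     if len(content_lower) < 50:
--         return True
--     for pattern in EMPTY_SCRAPE_PATTERNS:
--         if pattern in content_lower[:500]: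
--             return True
--     return False
-- ===== SOURCE B (Python) =====
-- EMPTY_SCRAPE_PATTERNS = [
--     "javascript is required",
--     "enable javascript",
--     "please enable cookies",
--     "access denied",
--     "403 forbidden",
--     "page not found",
--     "404 error",
--     "captcha",
-- ]
--
-- def _is_empty_scrape(content: str) -> bool:
--     """Check if content is an empty or failed scrape."""
--     text = content.lower().strip()
--     if len(text) < 50:
--         return True
--     # One pass over the first 500 characters, simulating the alternation
--     # automaton of all patterns at once: `active` holds the still-unmatched
--     # tails of patterns whose beginning matched some earlier position.
--     active = []
--     for ch in text[:500]:
--         nxt = []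
--         for tail in active + EMPTY_SCRAPE_PATTERNS:
--             if tail[0] == ch:
--                 if len(tail) == 1:
--                     return True
--                 nxt.append(tail[1:])
--         active = nxt
--     return False
-- ===== Notes on version B (the rewrite author's own statement) =====
-- stated objective: alternative
-- what changed: B scans the 500-char prefix once, simulating the alternation automaton of all eight patterns with a worklist of still-unmatched pattern tails, instead of A's eight independent substring searches.
import Mathlib
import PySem

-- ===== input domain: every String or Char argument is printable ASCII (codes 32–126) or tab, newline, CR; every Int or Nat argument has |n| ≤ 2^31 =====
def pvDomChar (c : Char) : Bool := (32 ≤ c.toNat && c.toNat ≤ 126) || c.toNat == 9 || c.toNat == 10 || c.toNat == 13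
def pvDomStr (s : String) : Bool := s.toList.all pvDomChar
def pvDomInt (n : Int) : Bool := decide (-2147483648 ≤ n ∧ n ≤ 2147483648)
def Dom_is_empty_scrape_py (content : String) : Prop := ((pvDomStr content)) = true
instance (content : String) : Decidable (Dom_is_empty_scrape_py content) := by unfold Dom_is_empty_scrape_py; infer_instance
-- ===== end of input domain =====

-- B replaces A's eight independent substring searches over the 500-char prefix with one
-- left-to-right pass simulating the alternation automaton of all patterns at once
-- (objective: alternative; same result proved).

-- ===== PORT A =====
def pvPatterns : List String := [
  "javascript is required",
  "enable javascript",
  "please enable cookies",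
  "access denied",
  "403 forbidden",
  "page not found",
  "404 error",
  "captcha"]

def is_empty_scrape_py (content : String) : Bool :=
  let cl := PySem.Str.strip (PySem.Str.lower content)
  if PySem.Str.len cl < 50 then true
  else pvPatterns.any (fun p => PySem.Str.isIn p (PySem.Str.slice cl none (some 500)))

-- ===== PORT B =====
-- Source B's inner loop: advance every still-unmatched pattern tail past `ch`;
-- `none` = some tail was fully matched (Python's `return True`).
def pvStep (ch : Char) : List (List Char) → Option (List (List Char))
  | [] => some []
  | (c :: t) :: rs =>
      if c = ch then
        if t = [] then none
        else Option.map (fun l => t :: l) (pvStep ch rs)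
      else pvStep ch rs
  | [] :: rs => pvStep ch rs

-- Source B's outer loop over the prefix, carrying `active`
def pvRun : List Char → List (List Char) → Bool
  | [], _ => false
  | ch :: rest, active =>
      match pvStep ch (active ++ pvPatterns.map String.toList) with
      | none => true
      | some nxt => pvRun rest nxt

def is_empty_scrape_py_alt (content : String) : Bool :=
  let text := PySem.Str.strip (PySem.Str.lower content)
  if PySem.Str.len text < 50 then true
  else pvRun (PySem.Str.slice text none (some 500)).toList []

-- ===== PRECONDITION & SPEC =====
def Spec_is_empty_scrape_py (content : String) (out : Bool) : Prop := out = is_empty_scrape_py_alt content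
instance (content : String) (out : Bool) : Decidable (Spec_is_empty_scrape_py content out) := by unfold Spec_is_empty_scrape_py; infer_instance

-- ===== CLAIM (what is proved, stated in full; the proofs are below) =====
def Claim_equal_is_empty_scrape_py : Prop := ∀ (content : String), Dom_is_empty_scrape_py content → Spec_is_empty_scrape_py content (is_empty_scrape_py content)

-- ===== LEMMAS AND PROOFS =====

theorem pvPatterns_ne : ∀ p ∈ pvPatterns, p.toList ≠ [] := by decide

theorem pvStep_none_iff (ch : Char) (L : List (List Char)) :
    pvStep ch L = none ↔ [ch] ∈ L := by
  induction L with
  | nil => simp [pvStep]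
  | cons r rs ih =>
      match r with
      | [] => simp [pvStep, ih]
      | c :: t =>
          by_cases hc : c = ch
          · by_cases ht : t = []
            · subst ht; simp [pvStep, hc]
            · simp only [pvStep, if_pos hc, if_neg ht, List.mem_cons]
              constructor
              · intro h
                rcases hstep : pvStep ch rs with _ | l
                · exact Or.inr (ih.mp hstep)
                · rw [hstep] at h; simp at h
              · rintro (h | h)
                · exact absurd h (by subst hc; simpa using fun he => ht he)
                · rw [ih.mpr h]; rfl
          · simp only [pvStep, if_neg hc, ih, List.mem_cons]
            constructor
            · exact Or.inr
            · rintro (h | h)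
              · cases h; exact absurd rfl hc
              · exact h

theorem pvStep_some_mem (ch : Char) (L : List (List Char)) (nxt : List (List Char))
    (h : pvStep ch L = some nxt) (x : List Char) :
    x ∈ nxt ↔ (ch :: x) ∈ L ∧ x ≠ [] := by
  induction L generalizing nxt with
  | nil => simp [pvStep] at h; subst h; simp
  | cons r rs ih =>
      match r with
      | [] =>
          simp only [pvStep] at h
          rw [ih nxt h]
          simp
      | c :: t =>
          by_cases hc : c = ch
          · by_cases ht : t = []
            · subst ht; simp [pvStep, hc] at h
            · subst hc
              rcases hstep : pvStep c rs with _ | l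
              · simp [pvStep, ht, hstep] at h
              · simp [pvStep, ht, hstep] at h
                subst h
                simp only [List.mem_cons, ih l hstep, List.cons.injEq]
                constructor
                · rintro (rfl | ⟨hm, hne⟩)
                  · exact ⟨Or.inl (by simp), ht⟩
                  · exact ⟨Or.inr hm, hne⟩
                · rintro ⟨(⟨_, rfl⟩ | hm), hne⟩
                  · exact Or.inl rfl
                  · exact Or.inr ⟨hm, hne⟩
          · simp only [pvStep, if_neg hc] at h
            rw [ih nxt h]
            simp only [List.mem_cons, List.cons.injEq]
            constructor
            · rintro ⟨hm, hne⟩; exact ⟨Or.inr hm, hne⟩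
            · rintro ⟨(⟨he, _⟩ | hm), hne⟩
              · exact absurd he.symm hc
              · exact ⟨hm, hne⟩

theorem pvRun_iff (l : List Char) : ∀ (active : List (List Char)),
    (∀ r ∈ active, r ≠ []) →
    (pvRun l active = true ↔
      (∃ r ∈ active, r <+: l) ∨ ∃ p ∈ pvPatterns, p.toList <:+: l) := by
  induction l with
  | nil =>
      intro active hne
      simp only [pvRun, List.prefix_nil, List.infix_nil]
      constructor
      · intro h; exact absurd h (by decide)
      · rintro (⟨r, hr, rfl⟩ | ⟨p, hp, hpe⟩)
        · exact absurd rfl (hne _ hr)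
        · exact absurd hpe (pvPatterns_ne p hp)
  | cons ch rest ih =>
      intro active hne
      have hLne : ∀ r ∈ active ++ pvPatterns.map String.toList, r ≠ [] := by
        intro r hr
        rcases List.mem_append.mp hr with h | h
        · exact hne r h
        · rcases List.mem_map.mp h with ⟨p, hp, rfl⟩
          exact pvPatterns_ne p hp
      simp only [pvRun]
      rcases hstep : pvStep ch (active ++ pvPatterns.map String.toList) with _ | nxt
      · have hm : [ch] ∈ active ++ pvPatterns.map String.toList :=
          (pvStep_none_iff ch _).mp hstep
        constructor
        · intro _
          rcases List.mem_append.mp hm with h | h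
          · exact Or.inl ⟨[ch], h, by simp⟩
          · rcases List.mem_map.mp h with ⟨p, hp, hpe⟩
            exact Or.inr ⟨p, hp, by rw [hpe]; exact (List.prefix_cons_iff.mpr (Or.inr (by simp))).isInfix⟩
        · intro _; trivial
      · have hnot : [ch] ∉ active ++ pvPatterns.map String.toList := by
          intro hm
          rw [(pvStep_none_iff ch _).mpr hm] at hstep
          simp at hstep
        have hmem := pvStep_some_mem ch _ nxt hstep
        have hnxtne : ∀ r ∈ nxt, r ≠ [] := fun r hr => ((hmem r).mp hr).2
        rw [ih nxt hnxtne]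
        constructor
        · rintro (⟨r, hr, hpre⟩ | ⟨p, hp, hinf⟩)
          · rcases (hmem r).mp hr with ⟨hm, _⟩
            rcases List.mem_append.mp hm with h | h
            · exact Or.inl ⟨ch :: r, h, List.cons_prefix_cons.mpr ⟨rfl, hpre⟩⟩
            · rcases List.mem_map.mp h with ⟨p, hp, hpe⟩
              exact Or.inr ⟨p, hp, by rw [hpe]; exact (List.cons_prefix_cons.mpr ⟨rfl, hpre⟩).isInfix⟩
          · exact Or.inr ⟨p, hp, hinf.trans (List.infix_cons_iff.mpr (Or.inr List.infix_rfl))⟩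
        · rintro (⟨r, hr, hpre⟩ | ⟨p, hp, hinf⟩)
          · match r, hne r hr, hpre with
            | c :: x, _, hpre =>
              rcases List.cons_prefix_cons.mp hpre with ⟨rfl, hx⟩
              rcases eq_or_ne x [] with rfl | hxne
              · exact absurd (List.mem_append.mpr (Or.inl hr)) hnot
              · exact Or.inl ⟨x, (hmem x).mpr ⟨List.mem_append.mpr (Or.inl hr), hxne⟩, hx⟩
          · rcases List.infix_cons_iff.mp hinf with hpre | hinf'
            · have hLmem : p.toList ∈ active ++ pvPatterns.map String.toList :=
                List.mem_append.mpr (Or.inr (List.mem_map.mpr ⟨p, hp, rfl⟩))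
              match hp2 : p.toList, pvPatterns_ne p hp, hpre with
              | c :: x, _, hpre =>
                rw [hp2] at hLmem
                rcases List.cons_prefix_cons.mp hpre with ⟨rfl, hx⟩
                rcases eq_or_ne x [] with rfl | hxne
                · exact absurd hLmem hnot
                · exact Or.inl ⟨x, (hmem x).mpr ⟨hLmem, hxne⟩, hx⟩
            · exact Or.inr ⟨p, hp, hinf'⟩

theorem pvAny_eq_run (s : String) :
    pvPatterns.any (fun p => PySem.Str.isIn p s) = pvRun s.toList [] := by
  simp only [PySem.Str.isIn_eq]
  rcases Bool.eq_false_or_eq_true (pvRun s.toList []) with h | h <;> rw [h]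
  · rw [List.any_eq_true]
    rcases (pvRun_iff s.toList [] (by simp)).mp h with ⟨r, hr, _⟩ | ⟨p, hp, hinf⟩
    · simp at hr
    · exact ⟨p, hp, (PySem.Chars.isIn_iff_infix _ _).mpr hinf⟩
  · rw [List.any_eq_false]
    intro p hp
    rw [Bool.not_eq_true, PySem.Chars.isIn_eq_false_iff]
    intro hinf
    have : pvRun s.toList [] = true :=
      (pvRun_iff s.toList [] (by simp)).mpr (Or.inr ⟨p, hp, hinf⟩)
    simp [this] at h

-- ===== VERDICT (by name: the statement is the Claim_ definition above) =====
theorem is_empty_scrape_py_spec : Claim_equal_is_empty_scrape_py := by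
  intro content _
  unfold Spec_is_empty_scrape_py is_empty_scrape_py is_empty_scrape_py_alt
  simp only []
  split
  · rfl
  · exact pvAny_eq_run _
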